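-- pv_equiv track=rewrite | github.com/zstrkalj/pdf-merger | src/pdf_merger/ui/page_select_dialog.py | _selection_to_range_text
-- ===== SOURCE A (Python) =====
-- def _selection_to_range_text(sel: set[int], total: int) -> str:
--     """Convert a set of 0-based indices back to a compact range string like ``"1-3, 5, 7"``."""
--     if not sel:
--         return ""
--     pages = sorted(sel)
--     parts: list[str] = []
--     start = prev = pages[0]
--     for p in pages[1:]:
--         if p == prev + 1:
--             prev = p
--         else:
--             parts.append(f"{start + 1}-{prev + 1}" if start != prev else str(start + 1))
--             start = prev = p
--     parts.append(f"{start + 1}-{prev + 1}" if start != prev else str(start + 1))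
--     return ", ".join(parts)
-- ===== SOURCE B (Python) =====
-- from itertools import groupby
--
-- def _selection_to_range_text(sel: set, total: int) -> str:
--     """Convert a set of 0-based indices back to a compact range string like "1-3, 5, 7"."""
--     if not sel:
--         return ""
--     pages = sorted(sel)
--     parts = []
--     for _, grp in groupby(enumerate(pages), key=lambda t: t[1] - t[0]):
--         run = list(grp)
--         first, last = run[0][1], run[-1][1]
--         parts.append(str(first + 1) if first == last else f"{first + 1}-{last + 1}")
--     return ", ".join(parts)
-- ===== Notes on version B (the rewrite author's own statement) =====
-- stated objective: idiomatic
-- what changed: Replaces the hand-rolled start/prev run-tracking loop by itertools.groupby over enumerate(pages) keyed on value-minus-index, so maximal consecutive runs fall out as groups and each group is formatted from its first and last element.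
import Mathlib
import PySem

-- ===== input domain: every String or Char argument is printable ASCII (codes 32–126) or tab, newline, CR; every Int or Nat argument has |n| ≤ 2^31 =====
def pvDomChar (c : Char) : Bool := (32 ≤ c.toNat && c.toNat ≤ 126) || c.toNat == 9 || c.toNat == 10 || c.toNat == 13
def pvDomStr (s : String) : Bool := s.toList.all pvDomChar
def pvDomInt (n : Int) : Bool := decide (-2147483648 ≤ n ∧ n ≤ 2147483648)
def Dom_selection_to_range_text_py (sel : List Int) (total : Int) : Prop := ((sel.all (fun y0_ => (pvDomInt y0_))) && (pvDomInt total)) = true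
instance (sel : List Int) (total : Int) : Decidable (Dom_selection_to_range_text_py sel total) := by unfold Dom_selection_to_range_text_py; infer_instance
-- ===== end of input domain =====

-- B replaces A's hand-rolled start/prev run-tracking loop by grouping enumerate(pages)
-- on the key value-minus-index (itertools.groupby), formatting each group from its
-- first and last element; objective: more idiomatic decomposition, same cost.


-- ===== PORT A =====
-- the f-string / str(...) emitted for one closed run (A writes it twice verbatim)
def pvFmtA (start prev : Int) : String :=
  if start ≠ prev then PySem.Int.toStr (start + 1) ++ "-" ++ PySem.Int.toStr (prev + 1)
  else PySem.Int.toStr (start + 1)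

-- the 'for p in pages[1:]' loop plus the trailing append, state = (start, prev, parts)
def pvALoop : List Int → Int → Int → List String → List String
  | [], start, prev, parts => parts ++ [pvFmtA start prev]
  | p :: rest, start, prev, parts =>
    if p = prev + 1 then pvALoop rest start p parts
    else pvALoop rest p p (parts ++ [pvFmtA start prev])

def selection_to_range_text_py (sel : List Int) (_total : Int) : String :=
  if sel = [] then ""
  else
    match PySem.List.sorted sel (fun x => x) false with
    | [] => ""  -- unreachable: sorted of a nonempty list is nonempty
    | p0 :: rest => PySem.Str.join ", " (pvALoop rest p0 p0 [])

-- ===== PORT B =====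
-- groupby key: lambda t: t[1] - t[0]
def pvKeyB (t : Int × Int) : Int := t.2 - t.1

-- itertools.groupby: maximal blocks of consecutive elements with equal key
def pvGroupRuns : List (Int × Int) → List (List (Int × Int))
  | [] => []
  | x :: xs =>
    match pvGroupRuns xs with
    | [] => [[x]]
    | [] :: gs => [x] :: gs  -- unreachable: groups are never empty
    | (y :: g) :: gs =>
      if pvKeyB x = pvKeyB y then (x :: y :: g) :: gs else [x] :: (y :: g) :: gs

-- run[-1][1] of a nonempty materialized group
def pvLastSnd (x : Int × Int) : List (Int × Int) → Int
  | [] => x.2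
  | y :: t => pvLastSnd y t

-- one loop body: first, last = run[0][1], run[-1][1]; append formatted part
def pvEmitB : List (Int × Int) → String
  | [] => ""
  | x :: t =>
    let first := x.2
    let last := pvLastSnd x t
    if first = last then PySem.Int.toStr (first + 1)
    else PySem.Int.toStr (first + 1) ++ "-" ++ PySem.Int.toStr (last + 1)

def selection_to_range_text_py_alt (sel : List Int) (_total : Int) : String :=
  if sel = [] then ""
  else
    PySem.Str.join ", "
      (((pvGroupRuns (PySem.List.enumerate (PySem.List.sorted sel (fun x => x) false) 0))).map pvEmitB)

-- ===== PRECONDITION & SPEC =====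
def Spec_selection_to_range_text_py (sel : List Int) (total : Int) (out : String) : Prop := out = selection_to_range_text_py_alt sel total
instance (sel : List Int) (total : Int) (out : String) : Decidable (Spec_selection_to_range_text_py sel total out) := by unfold Spec_selection_to_range_text_py; infer_instance

-- ===== CLAIM (what is proved, stated in full; the proofs are below) =====
def Claim_equal_selection_to_range_text_py : Prop := ∀ (sel : List Int) (total : Int), Dom_selection_to_range_text_py sel total → Spec_selection_to_range_text_py sel total (selection_to_range_text_py sel total)

-- ===== LEMMAS AND PROOFS =====

-- reference: the list of (start, last) pairs of the maximal consecutive runs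
def pvGo : List Int → Int → Int → List (Int × Int)
  | [], start, prev => [(start, prev)]
  | p :: rest, start, prev =>
    if p = prev + 1 then pvGo rest start p else (start, prev) :: pvGo rest p p

theorem pvALoop_eq_go (rest : List Int) : ∀ (start prev : Int) (parts : List String),
    pvALoop rest start prev parts = parts ++ (pvGo rest start prev).map (fun q => pvFmtA q.1 q.2) := by
  induction rest with
  | nil => intro s p parts; simp [pvALoop, pvGo]
  | cons q ys ih =>
    intro s p parts
    by_cases h : q = p + 1 <;> simp [pvALoop, pvGo, h, ih]

def pvSetFirst (s : Int) : List (Int × Int) → List (Int × Int)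
  | [] => []
  | (_, b) :: t => (s, b) :: t

theorem pvSetFirst_setFirst (s p : Int) (l : List (Int × Int)) :
    pvSetFirst s (pvSetFirst p l) = pvSetFirst s l := by
  cases l with
  | nil => rfl
  | cons x t => cases x; rfl

theorem pvGroupRuns_cons (x : Int × Int) (xs : List (Int × Int)) :
    pvGroupRuns (x :: xs) = match pvGroupRuns xs with
      | [] => [[x]]
      | [] :: gs => [x] :: gs
      | (y :: g) :: gs =>
        if pvKeyB x = pvKeyB y then (x :: y :: g) :: gs else [x] :: (y :: g) :: gs := rfl

theorem pvGo_setFirst (xs : List Int) : ∀ (prev s : Int),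
    pvGo xs s prev = pvSetFirst s (pvGo xs prev prev) := by
  induction xs with
  | nil => intro prev s; simp [pvGo, pvSetFirst]
  | cons q ys ih =>
    intro prev s
    by_cases h : q = prev + 1
    · subst h
      rw [show pvGo ((prev+1) :: ys) s prev = pvGo ys s (prev+1) from by simp [pvGo],
          show pvGo ((prev+1) :: ys) prev prev = pvGo ys prev (prev+1) from by simp [pvGo]]
      rw [ih (prev+1) s, ih (prev+1) prev, pvSetFirst_setFirst]
    · simp [pvGo, h, pvSetFirst]

theorem pvGroupRuns_cons_shape (x : Int × Int) (xs : List (Int × Int)) :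
    ∃ t gs, pvGroupRuns (x :: xs) = (x :: t) :: gs := by
  rcases h : pvGroupRuns xs with _ | ⟨g, gs⟩
  · exact ⟨[], [], by rw [pvGroupRuns_cons, h]⟩
  · rcases g with _ | ⟨y, g'⟩
    · exact ⟨[], gs, by rw [pvGroupRuns_cons, h]⟩
    · by_cases hk : pvKeyB x = pvKeyB y
      · exact ⟨y :: g', gs, by rw [pvGroupRuns_cons, h]; simp [hk]⟩
      · exact ⟨[], (y :: g') :: gs, by rw [pvGroupRuns_cons, h]; simp [hk]⟩

def pvToPair : List (Int × Int) → Int × Int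
  | [] => (0, 0)
  | x :: t => (x.2, pvLastSnd x t)

theorem pvGroupRuns_toPair (xs : List Int) : ∀ (i p : Int),
    (pvGroupRuns (PySem.List.enumerate (p :: xs) i)).map pvToPair = pvGo xs p p := by
  induction xs with
  | nil =>
    intro i p
    simp [PySem.List.enumerate_cons, PySem.List.enumerate_nil, pvGroupRuns, pvToPair,
      pvLastSnd, pvGo]
  | cons q ys ih =>
    intro i p
    obtain ⟨t, gs, hsh⟩ := pvGroupRuns_cons_shape ((i + 1, q)) (PySem.List.enumerate ys (i + 1 + 1))
    have henum : PySem.List.enumerate (p :: q :: ys) i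
        = (i, p) :: (i + 1, q) :: PySem.List.enumerate ys (i + 1 + 1) := by
      simp [PySem.List.enumerate_cons]
    have hih := ih (i + 1) q
    rw [PySem.List.enumerate_cons] at hih
    rw [hsh] at hih
    by_cases h : q = p + 1
    · subst h
      have hk : pvKeyB (i, p) = pvKeyB (i + 1, p + 1) := by simp [pvKeyB]
      have hG : pvGroupRuns (PySem.List.enumerate (p :: (p + 1) :: ys) i)
          = ((i, p) :: (i + 1, p + 1) :: t) :: gs := by
        rw [henum, pvGroupRuns_cons, hsh]; simp [hk]
      rw [hG]
      have hgo : pvGo ((p + 1) :: ys) p p = pvSetFirst p (pvGo ys (p + 1) (p + 1)) := by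
        rw [show pvGo ((p + 1) :: ys) p p = pvGo ys p (p + 1) from by simp [pvGo]]
        exact pvGo_setFirst ys (p + 1) p
      rw [hgo, ← hih]
      simp [pvToPair, pvLastSnd, pvSetFirst]
    · have hk : pvKeyB (i, p) ≠ pvKeyB (i + 1, q) := by simp [pvKeyB]; omega
      have hG : pvGroupRuns (PySem.List.enumerate (p :: q :: ys) i)
          = [(i, p)] :: ((i + 1, q) :: t) :: gs := by
        rw [henum, pvGroupRuns_cons, hsh]; simp [hk]
      rw [hG, show pvGo (q :: ys) p p = (p, p) :: pvGo ys q q from by simp [pvGo, h], ← hih]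
      simp [pvToPair, pvLastSnd]

theorem pvEmitB_eq_fmt (x : Int × Int) (t : List (Int × Int)) :
    pvEmitB (x :: t) = pvFmtA (pvToPair (x :: t)).1 (pvToPair (x :: t)).2 := by
  simp only [pvEmitB, pvToPair, pvFmtA]
  by_cases h : x.2 = pvLastSnd x t <;> simp [h]

theorem pvGroupRuns_nonempty (xs : List (Int × Int)) :
    ∀ g ∈ pvGroupRuns xs, g ≠ [] := by
  induction xs with
  | nil => simp [pvGroupRuns]
  | cons x xs ih =>
    intro g hg
    rw [pvGroupRuns_cons] at hg
    rcases h : pvGroupRuns xs with _ | ⟨g0, gs⟩ <;> rw [h] at hg ih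
    · simp at hg; simp [hg]
    · rcases g0 with _ | ⟨y, g'⟩
      · rcases List.mem_cons.mp hg with rfl | hg
        · simp
        · exact ih g (List.mem_cons_of_mem _ hg)
      · by_cases hk : pvKeyB x = pvKeyB y <;> simp only [hk, reduceIte] at hg
        · rcases List.mem_cons.mp hg with rfl | hg
          · simp
          · exact ih g (List.mem_cons_of_mem _ hg)
        · rcases List.mem_cons.mp hg with rfl | hg
          · simp
          · rcases List.mem_cons.mp hg with rfl | hg
            · simp
            · exact ih g (List.mem_cons_of_mem _ hg)

theorem pvMap_emit_eq (xs : List (Int × Int)) :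
    (pvGroupRuns xs).map pvEmitB
      = ((pvGroupRuns xs).map pvToPair).map (fun q => pvFmtA q.1 q.2) := by
  rw [List.map_map]
  apply List.map_congr_left
  intro g hg
  rcases g with _ | ⟨x, t⟩
  · exact absurd rfl (pvGroupRuns_nonempty xs [] hg)
  · exact pvEmitB_eq_fmt x t

-- ===== VERDICT (by name: the statement is the Claim_ definition above) =====
theorem selection_to_range_text_py_spec : Claim_equal_selection_to_range_text_py := by
  intro sel total _
  unfold Spec_selection_to_range_text_py selection_to_range_text_py selection_to_range_text_py_alt
  by_cases hs : sel = []
  · simp [hs]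
  · simp only [hs, reduceIte]
    rcases h : PySem.List.sorted sel (fun x => x) false with _ | ⟨p0, rest⟩
    · rw [PySem.List.sorted_eq_nil_iff] at h; exact absurd h hs
    · show PySem.Str.join ", " (pvALoop rest p0 p0 []) = _
      rw [pvALoop_eq_go, pvMap_emit_eq, pvGroupRuns_toPair rest 0 p0]
      simp
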